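-- pv_equiv track=rewrite | github.com/Phil-A-Sophist/concise-guide-english-grammar | Homework/Exams/generate_study_guide_docx.py | compute_spans
-- ===== SOURCE A (Python) =====
-- def compute_spans(labels):
--     """Convert flat label list to (label, span_count, start_index) tuples.
--
--     Non-empty labels start a new span; consecutive empty strings extend it.
--     """
--     spans = []
--     i = 0
--     while i < len(labels):
--         label = labels[i]
--         if label:
--             span = 1
--             while i + span < len(labels) and labels[i + span] == "":
--                 span += 1
--             spans.append((label, span, i))
--             i += span
--         else:
--             i += 1
--     return spans
-- ===== SOURCE B (Python) =====
-- def compute_spans(labels):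
--     """Convert flat label list to (label, span_count, start_index) tuples.
--
--     Single pass with enumerate: a non-empty label opens a new span; an empty
--     string extends the most recently opened span (if any) in place.
--     """
--     spans = []
--     for i, label in enumerate(labels):
--         if label:
--             spans.append((label, 1, i))
--         elif spans:
--             lab, cnt, start = spans[-1]
--             spans[-1] = (lab, cnt + 1, start)
--     return spans
-- ===== Notes on version B (the rewrite author's own statement) =====
-- stated objective: simpler
-- what changed: Replaces A's nested while loops with index jumping by a single enumerate pass that appends a new span on a non-empty label and increments the last span in place on an empty one.
import Mathlib
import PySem

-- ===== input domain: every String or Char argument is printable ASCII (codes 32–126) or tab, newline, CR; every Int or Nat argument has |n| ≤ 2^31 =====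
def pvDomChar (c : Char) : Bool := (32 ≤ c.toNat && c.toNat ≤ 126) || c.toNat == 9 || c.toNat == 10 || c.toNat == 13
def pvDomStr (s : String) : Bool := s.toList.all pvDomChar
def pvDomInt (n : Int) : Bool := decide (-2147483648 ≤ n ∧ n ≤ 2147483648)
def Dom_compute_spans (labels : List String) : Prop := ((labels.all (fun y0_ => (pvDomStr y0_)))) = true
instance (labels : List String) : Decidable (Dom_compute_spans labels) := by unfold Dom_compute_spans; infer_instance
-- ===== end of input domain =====

-- B replaces A's nested while loops (inner scan over trailing empties, index jump) by a
-- single enumerate pass that opens a span on a non-empty label and bumps the last span on "".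

-- ===== PORT A =====
-- inner while: span = 1 + number of consecutive "" after position i
-- (fuel only makes the loop total: fuel = labels.length always suffices, since each
-- iteration needs i + span < labels.length and increments span)
def innerA (labels : List String) (i : Nat) : Nat → Nat → Nat
  | 0, span => span
  | fuel + 1, span =>
    if i + span < labels.length ∧ labels.getD (i + span) "" = "" then
      innerA labels i fuel (span + 1)
    else span

-- outer while over index i (fuel = labels.length suffices: i grows by ≥ 1 per iteration)
def outerA (labels : List String) :
    Nat → Nat → List (String × Int × Int) → List (String × Int × Int)
  | 0, _, spans => spans
  | fuel + 1, i, spans =>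
    if i < labels.length then
      let label := labels.getD i ""
      if label ≠ "" then
        let span := innerA labels i labels.length 1
        outerA labels fuel (i + span) (spans ++ [(label, (span : Int), (i : Int))])
      else outerA labels fuel (i + 1) spans
    else spans

def compute_spans (labels : List String) : List (String × Int × Int) :=
  outerA labels labels.length 0 []

-- ===== PORT B =====
-- one enumerate step of Source B's loop
def bStep (spans : List (String × Int × Int)) (p : Int × String) :
    List (String × Int × Int) :=
  if p.2 ≠ "" then spans ++ [(p.2, 1, p.1)]
  else
    match spans.getLast? with
    | some (lab, cnt, st) => spans.dropLast ++ [(lab, cnt + 1, st)]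
    | none => spans

def compute_spans_alt (labels : List String) : List (String × Int × Int) :=
  (PySem.List.enumerate labels 0).foldl bStep []

-- ===== PRECONDITION & SPEC =====
def Spec_compute_spans (labels : List String) (out : List (String × Int × Int)) : Prop := out = compute_spans_alt labels
instance (labels : List String) (out : List (String × Int × Int)) : Decidable (Spec_compute_spans labels out) := by unfold Spec_compute_spans; infer_instance

-- ===== CLAIM (what is proved, stated in full; the proofs are below) =====
def Claim_equal_compute_spans : Prop := ∀ (labels : List String), Dom_compute_spans labels → Spec_compute_spans labels (compute_spans labels)

-- ===== LEMMAS AND PROOFS =====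

-- peel one element of the enumeration at index i
theorem enum_drop_peel (labels : List String) (s : Int) (i : Nat) (h : i < labels.length) :
    (PySem.List.enumerate labels s).drop i =
      (s + i, labels.getD i "") :: (PySem.List.enumerate labels s).drop (i + 1) := by
  induction labels generalizing s i with
  | nil => simp at h
  | cons x xs ih =>
    cases i with
    | zero => simp [PySem.List.enumerate_cons]
    | succ j =>
      simp only [PySem.List.enumerate_cons, List.drop_succ_cons, List.getD_cons_succ]
      rw [ih (s + 1) j (by simpa using h)]
      congr 2
      push_cast
      ring

theorem enum_drop_len (labels : List String) (s : Int) (i : Nat) (h : labels.length ≤ i) :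
    (PySem.List.enumerate labels s).drop i = [] := by
  apply List.drop_eq_nil_of_le
  simpa [PySem.List.length_enumerate] using h

-- the result never drops below the running span count
theorem innerA_ge (labels : List String) (i : Nat) :
    ∀ fuel span, span ≤ innerA labels i fuel span := by
  intro fuel
  induction fuel with
  | zero => intro span; simp [innerA]
  | succ k ih =>
    intro span
    rw [innerA]
    split
    · exact le_trans (Nat.le_succ span) (ih (span + 1))
    · exact le_refl span

-- full characterisation of the inner while loop (given enough fuel): every position
-- strictly between span and the result is an in-range "" and the loop stops at a
-- non-"" or at the end of the list
theorem innerA_spec (labels : List String) (i : Nat) :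
    ∀ fuel span, labels.length ≤ i + span + fuel →
      (∀ m, span ≤ m → m < innerA labels i fuel span →
        i + m < labels.length ∧ labels.getD (i + m) "" = "") ∧
      (i + innerA labels i fuel span < labels.length →
        ¬ labels.getD (i + innerA labels i fuel span) "" = "") := by
  intro fuel
  induction fuel with
  | zero =>
    intro span hf
    simp only [innerA]
    exact ⟨fun m h1 h2 => by omega, fun hlt => by omega⟩
  | succ k ih =>
    intro span hf
    rw [innerA]
    split
    · rename_i h
      obtain ⟨ih1, ih2⟩ := ih (span + 1) (by omega)
      refine ⟨?_, ih2⟩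
      intro m h1 h2
      rcases Nat.eq_or_lt_of_le h1 with rfl | h1'
      · exact h
      · exact ih1 m h1' h2
    · rename_i h
      refine ⟨fun m h1 h2 => by omega, fun hlt he => h ⟨hlt, he⟩⟩

-- a run of c empty labels starting at j bumps the last span's count by c
theorem bump_run (labels : List String) :
    ∀ (c j : Nat) (spans0 : List (String × Int × Int)) (lab : String) (cnt st : Int),
      (∀ m, m < c → j + m < labels.length ∧ labels.getD (j + m) "" = "") →
      (((PySem.List.enumerate labels 0).drop j).foldl bStep (spans0 ++ [(lab, cnt, st)])) =
        (((PySem.List.enumerate labels 0).drop (j + c)).foldl bStep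
          (spans0 ++ [(lab, cnt + (c : Int), st)])) := by
  intro c
  induction c with
  | zero => intro j spans0 lab cnt st _; simp
  | succ k ih =>
    intro j spans0 lab cnt st hrun
    obtain ⟨hj, hje⟩ := hrun 0 (by omega)
    simp only [Nat.add_zero] at hj hje
    rw [enum_drop_peel labels 0 j hj]
    simp only [List.foldl_cons]
    have hstep : bStep (spans0 ++ [(lab, cnt, st)]) (0 + (j : Int), labels.getD j "") =
        spans0 ++ [(lab, cnt + 1, st)] := by
      simp only [List.getD_eq_getElem?_getD] at hje
      simp [bStep, hje]
    rw [hstep, ih (j + 1) spans0 lab (cnt + 1) st ?_]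
    · have h1 : j + 1 + k = j + (k + 1) := by omega
      have h2 : cnt + 1 + (k : Int) = cnt + ((k + 1 : Nat) : Int) := by push_cast; ring
      rw [h1, h2]
    · intro m hm
      have h4 := hrun (m + 1) (by omega)
      have h3 : j + 1 + m = j + (m + 1) := by omega
      rw [h3]
      exact h4

-- main loop correspondence: outerA from index i computes the fold of bStep over the
-- enumeration suffix, given A's loop invariant (a non-empty spans means labels[i] ≠ "")
theorem main_loop (labels : List String) :
    ∀ fuel i spans, labels.length ≤ i + fuel →
      (spans ≠ [] → i < labels.length → labels.getD i "" ≠ "") →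
      outerA labels fuel i spans = ((PySem.List.enumerate labels 0).drop i).foldl bStep spans := by
  intro fuel
  induction fuel with
  | zero =>
    intro i spans hf _
    rw [outerA, enum_drop_len labels 0 i (by omega)]
    simp
  | succ k ih =>
    intro i spans hf hinv
    rw [outerA]
    split
    · rename_i hi
      rw [enum_drop_peel labels 0 i hi]
      simp only [List.foldl_cons, zero_add]
      by_cases hl : labels.getD i "" = ""
      · -- empty label: spans must still be empty, both sides skip
        have hsp : spans = [] := by
          by_contra hne
          exact hinv hne hi hl
        subst hsp
        have hl2 : labels[i]?.getD "" = "" := by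
          simpa [List.getD_eq_getElem?_getD] using hl
        rw [if_neg (fun h => h hl)]
        have hb : bStep [] ((i : Int), labels.getD i "") = [] := by
          simp [bStep, hl2]
        rw [hb]
        exact ih (i + 1) [] (by omega) (by intro h; exact absurd rfl h)
      · -- non-empty label: A emits a whole span, B emits it step by step
        rw [if_pos hl]
        have hl2 : ¬ labels[i]?.getD "" = "" := by
          simpa [List.getD_eq_getElem?_getD] using hl
        have hb : bStep spans ((i : Int), labels.getD i "") =
            spans ++ [(labels.getD i "", 1, (i : Int))] := by
          simp [bStep, hl2]
        rw [hb]
        have hge := innerA_ge labels i labels.length 1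
        obtain ⟨hfill, hstop⟩ := innerA_spec labels i labels.length 1 (by omega)
        set sp := innerA labels i labels.length 1 with hsp
        have hrun : ∀ m, m < sp - 1 →
            (i + 1) + m < labels.length ∧ labels.getD ((i + 1) + m) "" = "" := by
          intro m hm
          have h5 := hfill (m + 1) (by omega) (by omega)
          have h6 : i + 1 + m = i + (m + 1) := by omega
          rw [h6]
          exact h5
        rw [bump_run labels (sp - 1) (i + 1) spans (labels.getD i "") 1 (i : Int) hrun]
        have hsplt : i + sp ≤ labels.length := by
          by_contra hgt
          have := (hfill (labels.length - i) (by omega) (by omega)).1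
          omega
        have h7 : i + 1 + (sp - 1) = i + sp := by omega
        have h8 : (1 : Int) + ((sp - 1 : Nat) : Int) = ((sp : Nat) : Int) := by
          have h9 : (1:Nat) ≤ sp := hge
          push_cast [h9]
          ring
        rw [h7, h8]
        exact ih (i + sp) (spans ++ [(labels.getD i "", (sp : Int), (i : Int))]) (by omega)
          (by intro _ hlt; exact hstop hlt)
    · rename_i hge
      rw [enum_drop_len labels 0 i (by omega)]
      simp

-- ===== VERDICT (by name: the statement is the Claim_ definition above) =====
theorem compute_spans_spec : Claim_equal_compute_spans := by
  intro labels _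
  unfold Spec_compute_spans compute_spans compute_spans_alt
  rw [main_loop labels labels.length 0 [] (by omega) (by intro h; exact absurd rfl h)]
  simp
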